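-- pv_equiv track=rewrite | github.com/iSchool-597PR/2021Fall_finals | Monte_Carlo_Module.py | QueBank
-- ===== SOURCE A (Python) =====
-- from collections import deque, OrderedDict
--
-- def QueBank(tmp):
--     empty = deque([])
--     count1 = deque([])
--     count2 = deque([])
--     count3 = deque([])
--     count4 = deque([])
--     wait_dict = dict()
--     count1_waitime = 0
--     count2_waitime = 0
--     count3_waitime = 0
--     count4_waitime = 0
--     results = []
--     for i in range(len(tmp)):
--         count_waitime = [count1_waitime, count2_waitime, count3_waitime, count4_waitime]
--         Best_count = count_waitime.index(min(count_waitime))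
--         if Best_count == 0:
--             count1.append(i + 1)
--             count1_waitime += int(tmp[i]) * 5
--             if count1_waitime not in wait_dict:
--                 wait_dict[count1_waitime] = [(i + 1, 1)]
--             else:
--                 wait_dict[count1_waitime].append((i + 1, 1))
--         elif Best_count == 1:
--             count2.append(i + 1)
--             count2_waitime += int(tmp[i]) * 5
--             if count2_waitime not in wait_dict:
--                 wait_dict[count2_waitime] = [(i + 1, 2)]
--             else:
--                 wait_dict[count2_waitime].append((i + 1, 2))
--         elif Best_count == 2:
--             count3.append(i + 1)
--             count3_waitime += int(tmp[i]) * 5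
--             if count3_waitime not in wait_dict:
--                 wait_dict[count3_waitime] = [(i + 1, 3)]
--             else:
--                 wait_dict[count3_waitime].append((i + 1, 3))
--         elif Best_count == 3:
--             count4.append(i + 1)
--             count4_waitime += int(tmp[i]) * 5
--             if count4_waitime not in wait_dict:
--                 wait_dict[count4_waitime] = [(i + 1, 4)]
--             else:
--                 wait_dict[count4_waitime].append((i + 1, 4))
--     order = sorted(wait_dict)
--     results = []
--     for key in order:
--         sort_value = sorted(wait_dict[key], key=lambda t: t[1])
--         results.append([each[0] for each in sort_value])
--     tmp = []
--     for each in results: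
--         tmp += each
--     return tmp
-- ===== SOURCE B (Python) =====
-- def QueBank(tmp):
--     # A priority queue held as a list of (wait, counter) pairs kept sorted
--     # ascending: the head is always the next counter to serve (lex order on
--     # (wait, counter) reproduces "first index of the minimum").  Flat
--     # (finish, counter, id) records plus one final sort replace A's
--     # repeated min-scan, dead deques and dict-of-lists grouping.
--     pq = [(0, 1), (0, 2), (0, 3), (0, 4)]
--     records = []
--     for i in range(len(tmp)):
--         w, c = pq.pop(0)
--         w += int(tmp[i]) * 5
--         j = 0
--         while j < len(pq) and pq[j] < (w, c):
--             j += 1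
--         pq.insert(j, (w, c))
--         records.append((w, c, i + 1))
--     records.sort()
--     return [r[2] for r in records]
-- ===== Notes on version B (the rewrite author's own statement) =====
-- stated objective: alternative
-- what changed: Replaces A's per-customer linear min-scan over the four wait counters and its dict-of-lists keyed by finish time (walked in sorted-key order, each group re-sorted by counter) with a priority queue kept as a sorted list of (wait, counter) pairs -- pop the head, ordered re-insert -- plus flat (finish, counter, id) records returned after one lexicographic sort.
import Mathlib
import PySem

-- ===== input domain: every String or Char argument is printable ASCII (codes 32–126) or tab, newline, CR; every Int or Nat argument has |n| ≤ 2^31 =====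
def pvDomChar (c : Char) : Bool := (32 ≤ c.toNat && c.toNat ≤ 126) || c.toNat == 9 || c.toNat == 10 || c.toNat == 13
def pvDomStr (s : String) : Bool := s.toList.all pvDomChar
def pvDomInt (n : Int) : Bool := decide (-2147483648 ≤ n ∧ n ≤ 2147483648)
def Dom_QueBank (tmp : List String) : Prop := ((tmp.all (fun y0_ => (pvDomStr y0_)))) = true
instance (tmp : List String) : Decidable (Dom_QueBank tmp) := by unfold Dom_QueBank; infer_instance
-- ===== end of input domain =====

-- B replaces A's per-customer linear min-scan over four wait counters and its
-- dict-of-lists keyed by finish time by a priority queue kept as a sorted list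
-- of (wait, counter) pairs (pop head / ordered re-insert) plus one flat
-- lexicographic sort of (finish, counter, id) records; alternative structure.

-- ===== PORT A =====
-- loop body of A; state = (count1, count2, count3, count4, wait_dict, w1, w2, w3, w4)
def QueBankStepA (tmp : List String)
    (st : List Int × List Int × List Int × List Int ×
          PySem.Dict Int (List (Int × Int)) × Int × Int × Int × Int) (i : Int) :
    List Int × List Int × List Int × List Int ×
    PySem.Dict Int (List (Int × Int)) × Int × Int × Int × Int :=
  match st with
  | (c1, c2, c3, c4, wd, w1, w2, w3, w4) =>
    let cw : List Int := [w1, w2, w3, w4]                                   -- count_waitime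
    let best := (PySem.List.index? cw ((PySem.List.min? cw (fun x => x)).getD 0)).getD 0
    let x := (PySem.Int.ofStr? ((PySem.List.pyGet? tmp i).getD "")).getD 0  -- int(tmp[i]); i in range, Pre_ makes it parse
    if best = 0 then
      let w1' := w1 + x * 5
      let wd' := if wd.contains w1' = false then wd.insert w1' [(i + 1, 1)]
                 else wd.insert w1' (wd.getD w1' [] ++ [(i + 1, 1)])
      (c1 ++ [i + 1], c2, c3, c4, wd', w1', w2, w3, w4)
    else if best = 1 then
      let w2' := w2 + x * 5
      let wd' := if wd.contains w2' = false then wd.insert w2' [(i + 1, 2)]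
                 else wd.insert w2' (wd.getD w2' [] ++ [(i + 1, 2)])
      (c1, c2 ++ [i + 1], c3, c4, wd', w1, w2', w3, w4)
    else if best = 2 then
      let w3' := w3 + x * 5
      let wd' := if wd.contains w3' = false then wd.insert w3' [(i + 1, 3)]
                 else wd.insert w3' (wd.getD w3' [] ++ [(i + 1, 3)])
      (c1, c2, c3 ++ [i + 1], c4, wd', w1, w2, w3', w4)
    else if best = 3 then
      let w4' := w4 + x * 5
      let wd' := if wd.contains w4' = false then wd.insert w4' [(i + 1, 4)]
                 else wd.insert w4' (wd.getD w4' [] ++ [(i + 1, 4)])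
      (c1, c2, c3, c4 ++ [i + 1], wd', w1, w2, w3, w4')
    else (c1, c2, c3, c4, wd, w1, w2, w3, w4)

def QueBank (tmp : List String) : List Int :=
  let wd := ((PySem.List.pyRange 0 (tmp.length : Int)).foldl (QueBankStepA tmp)
              ([], [], [], [], PySem.Dict.empty, 0, 0, 0, 0)).2.2.2.2.1
  let order := PySem.List.sorted wd.keys (fun k => k)                       -- sorted(wait_dict)
  let results := order.map (fun key =>
    (PySem.List.sorted (wd.getD key []) (fun t => t.2)).map (fun each => each.1))
  results.foldl (fun acc each => acc ++ each) []                            -- tmp += each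

-- ===== PORT B =====
-- B's while-loop insertion into the sorted queue: skip while pq[j] < (w, c)
-- (Python tuple comparison is lexicographic), insert before the first ≥ pair.
def pqInsert (p : Int × Int) : List (Int × Int) → List (Int × Int)
  | [] => [p]
  | q :: rest =>
    if q.1 < p.1 ∨ (q.1 = p.1 ∧ q.2 < p.2) then q :: pqInsert p rest
    else p :: q :: rest

-- loop body of B; state = (pq, records); pq.pop(0): pq always has 4 entries,
-- so headD/tail transcribe the pop exactly.
def QueBankStepB (tmp : List String)
    (st : List (Int × Int) × List (Int × Int × Int)) (i : Int) :
    List (Int × Int) × List (Int × Int × Int) :=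
  match st with
  | (pq, records) =>
    let p := pq.headD (0, 0)
    let w := p.1 + (PySem.Int.ofStr? ((PySem.List.pyGet? tmp i).getD "")).getD 0 * 5
    (pqInsert (w, p.2) pq.tail, records ++ [(w, p.2, i + 1)])

def QueBank_alt (tmp : List String) : List Int :=
  let st := (PySem.List.pyRange 0 (tmp.length : Int)).foldl (QueBankStepB tmp)
              ([(0, 1), (0, 2), (0, 3), (0, 4)], [])
  -- records.sort(): Python compares the (finish, counter, id) triples lexicographically
  (PySem.List.sorted st.2 (fun r => toLex (r.1, toLex (r.2.1, r.2.2)))).map (fun r => r.2.2)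

-- ===== PRECONDITION & SPEC =====
-- Pre_ excludes exactly the inputs where int(tmp[i]) raises ValueError in A (and in B).
def Pre_QueBank (tmp : List String) : Prop := ∀ s ∈ tmp, (PySem.Int.ofStr? s).isSome = true
instance (tmp : List String) : Decidable (Pre_QueBank tmp) := by unfold Pre_QueBank; infer_instance
def pvWitness_QueBank : List String := ["2", "0", "10", " -3 "]

def Spec_QueBank (tmp : List String) (out : List Int) : Prop := out = QueBank_alt tmp
instance (tmp : List String) (out : List Int) : Decidable (Spec_QueBank tmp out) := by unfold Spec_QueBank; infer_instance

-- ===== CLAIM (what is proved, stated in full; the proofs are below) =====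
def Claim_equal_QueBank : Prop := ∀ (tmp : List String), Dom_QueBank tmp → Pre_QueBank tmp → Spec_QueBank tmp (QueBank tmp)

-- ===== LEMMAS AND PROOFS =====

-- A's argmin over the four wait counters
def pvBest (w1 w2 w3 w4 : Int) : Nat :=
  (PySem.List.index? [w1, w2, w3, w4]
    ((PySem.List.min? [w1, w2, w3, w4] (fun x => x)).getD 0)).getD 0

-- the four (wait, counter) pairs of a wait quadruple
def pvPairs (ws : List Int) : List (Int × Int) :=
  [(ws.getD 0 0, 1), (ws.getD 1 0, 2), (ws.getD 2 0, 3), (ws.getD 3 0, 4)]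

-- the stream of (finish, counter, id) records the greedy assignment produces
def pvRecs (xs : List String) (i : Int) (waits : List Int) : List (Int × Int × Int) :=
  match xs with
  | [] => []
  | s :: rest =>
    let best := (PySem.List.index? waits ((PySem.List.min? waits (fun x => x)).getD 0)).getD 0
    let nw := waits.getD best 0 + (PySem.Int.ofStr? s).getD 0 * 5
    (nw, (best : Int) + 1, i + 1) :: pvRecs rest (i + 1) (waits.set best nw)

-- A's per-record dict update, written as one modify
def pvDstep (d : PySem.Dict Int (List (Int × Int))) (r : Int × Int × Int) :
    PySem.Dict Int (List (Int × Int)) :=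
  d.modify r.1 [] (· ++ [(r.2.2, r.2.1)])

lemma pvDictUpd (d : PySem.Dict Int (List (Int × Int))) (k : Int) (p : Int × Int) :
    (if d.contains k = false then d.insert k [p] else d.insert k (d.getD k [] ++ [p]))
      = d.modify k [] (fun l => l ++ [p]) := by
  have hmod : d.modify k [] (fun l => l ++ [p]) = d.insert k (d.getD k [] ++ [p]) := rfl
  cases h : d.contains k with
  | false =>
    rw [if_pos rfl, hmod]
    congr 1
    simp [PySem.Dict.getD_of_not_contains, h]
  | true => rw [hmod]; simp

-- facts about pvBest: it is < 4, picks a minimum, and the first one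
lemma pvBest_facts (w1 w2 w3 w4 : Int) :
    pvBest w1 w2 w3 w4 < 4 ∧
    (∀ y ∈ [w1, w2, w3, w4], [w1, w2, w3, w4].getD (pvBest w1 w2 w3 w4) 0 ≤ y) ∧
    (∀ k < pvBest w1 w2 w3 w4,
      [w1, w2, w3, w4].getD (pvBest w1 w2 w3 w4) 0 < [w1, w2, w3, w4].getD k 0) := by
  cases hm : PySem.List.min? [w1, w2, w3, w4] (fun x => x) with
  | none => exact absurd ((PySem.List.min?_eq_none_iff _ _).mp hm) (by simp)
  | some m =>
    have hmem := PySem.List.min?_mem hm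
    have hmin := PySem.List.min?_isMin hm
    have hsome : (PySem.List.index? [w1, w2, w3, w4] m).isSome = true :=
      (PySem.List.index?_isSome_iff _ _).mpr hmem
    cases hi : PySem.List.index? [w1, w2, w3, w4] m with
    | none => rw [hi] at hsome; simp at hsome
    | some k =>
      obtain ⟨hk, hget, hbefore⟩ := PySem.List.getElem_of_index?_eq_some hi
      have hb : pvBest w1 w2 w3 w4 = k := by simp only [pvBest, hm, Option.getD_some, hi]
      have hlen : ([w1, w2, w3, w4] : List Int).length = 4 := by simp
      have hgetD : [w1, w2, w3, w4].getD (pvBest w1 w2 w3 w4) 0 = m := by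
        rw [hb, List.getD_eq_getElem?_getD, List.getElem?_eq_getElem hk, hget]; rfl
      refine ⟨by omega, ?_, ?_⟩
      · intro y hy; rw [hgetD]; exact hmin y hy
      · intro j hj
        rw [hb] at hj
        have hjlt : j < ([w1, w2, w3, w4] : List Int).length := by omega
        have hne : [w1, w2, w3, w4][j] ≠ m := hbefore j hj
        have hle : m ≤ [w1, w2, w3, w4][j] := hmin _ (List.getElem_mem hjlt)
        rw [hgetD, List.getD_eq_getElem?_getD, List.getElem?_eq_getElem hjlt]
        exact lt_of_le_of_ne hle (fun h => hne h.symm)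

-- a strictly lex-least member heads the sorted list
lemma pvSorted_head (L : List (Int × Int)) (x : Int × Int) (hx : x ∈ L)
    (hmin : ∀ y ∈ L, y ≠ x → toLex x < toLex y) :
    ∃ t, PySem.List.sorted L (fun p => toLex p) = x :: t := by
  cases hS : PySem.List.sorted L (fun p => toLex p) with
  | nil =>
    rw [PySem.List.sorted_eq_nil_iff] at hS
    subst hS; simp at hx
  | cons a t =>
    by_cases hax : a = x
    · refine ⟨t, ?_⟩; rw [hax]
    · exfalso
      have haL : a ∈ L := by
        have : a ∈ PySem.List.sorted L (fun p => toLex p) := by rw [hS]; simp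
        rwa [PySem.List.mem_sorted] at this
      have hxa := hmin a haL hax
      have hle := PySem.List.key_head_sorted_le L (fun p => toLex p) hS x hx
      exact absurd hxa (not_lt.mpr hle)

lemma pvInsert_perm (p : Int × Int) (l : List (Int × Int)) :
    (pqInsert p l).Perm (p :: l) := by
  induction l with
  | nil => simp [pqInsert]
  | cons q rest ih =>
    show (if q.1 < p.1 ∨ (q.1 = p.1 ∧ q.2 < p.2) then q :: pqInsert p rest
          else p :: q :: rest).Perm (p :: q :: rest)
    split_ifs with h
    · exact (ih.cons q).trans (List.Perm.swap p q rest)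
    · exact List.Perm.refl _

lemma pvInsert_sorted (p : Int × Int) (l : List (Int × Int))
    (hl : l.Pairwise (fun a b => toLex a < toLex b))
    (hne : ∀ y ∈ l, y ≠ p) :
    (pqInsert p l).Pairwise (fun a b => toLex a < toLex b) := by
  induction l with
  | nil => simp [pqInsert]
  | cons q rest ih =>
    rw [List.pairwise_cons] at hl
    obtain ⟨hq, hrest⟩ := hl
    show (if q.1 < p.1 ∨ (q.1 = p.1 ∧ q.2 < p.2) then q :: pqInsert p rest
          else p :: q :: rest).Pairwise (fun a b => toLex a < toLex b)
    split_ifs with h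
    · rw [List.pairwise_cons]
      refine ⟨fun y hy => ?_, ih hrest (fun y hy => hne y (by simp [hy]))⟩
      have hy' := (pvInsert_perm p rest).mem_iff.mp hy
      rcases List.mem_cons.mp hy' with rfl | hy''
      · exact Prod.Lex.toLex_lt_toLex.mpr h
      · exact hq y hy''
    · have hqp : toLex p < toLex q := by
        have hne' : q ≠ p := hne q (by simp)
        rcases lt_or_gt_of_ne (fun he : toLex p = toLex q => hne' (toLex_inj.mp he).symm) with hlt | hgt
        · exact hlt
        · exact absurd (Prod.Lex.toLex_lt_toLex.mp hgt) h
      rw [List.pairwise_cons]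
      refine ⟨fun y hy => ?_, List.pairwise_cons.mpr ⟨hq, hrest⟩⟩
      rcases List.mem_cons.mp hy with rfl | hy'
      · exact hqp
      · exact hqp.trans (hq y hy')

-- core step of the sorted priority queue: pop the strictly lex-least head,
-- re-insert the updated pair; E = the other three pairs, L' = the new four
lemma pvPQ_core (L : List (Int × Int)) (x : Int × Int) (nw : Int)
    (E L' : List (Int × Int))
    (hxE : (x :: E).Perm L)
    (hmin : ∀ y ∈ L, y ≠ x → toLex x < toLex y)
    (hnd : (x :: E).Nodup)
    (hne : ∀ y ∈ E, y ≠ (nw, x.2))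
    (hperm : ((nw, x.2) :: E).Perm L') :
    ∃ t, PySem.List.sorted L (fun p => toLex p) = x :: t ∧
         pqInsert (nw, x.2) t = PySem.List.sorted L' (fun p => toLex p) := by
  obtain ⟨t, hS⟩ := pvSorted_head L x (hxE.mem_iff.mp (by simp)) hmin
  refine ⟨t, hS, ?_⟩
  have hSp : (x :: t).Perm L := by
    rw [← hS]; exact PySem.List.sorted_perm _ _ _
  have htE : t.Perm E := (List.perm_cons x).mp (hSp.trans hxE.symm)
  have hSle : (x :: t).Pairwise (fun a b => toLex a ≤ toLex b) := by
    rw [← hS]; exact PySem.List.sorted_pairwise _ _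
  have hSnd : (x :: t).Nodup := (hSp.trans hxE.symm).nodup_iff.mpr hnd
  have htlt : t.Pairwise (fun a b => toLex a < toLex b) := by
    have h1 := (List.pairwise_cons.mp hSle).2
    have h2 := (List.nodup_cons.mp hSnd).2
    exact (h1.and h2).imp (fun hab =>
      lt_of_le_of_ne hab.1 (fun he => hab.2 (toLex_inj.mp he)))
  have hins := pvInsert_sorted (nw, x.2) t htlt
    (fun y hy => hne y (htE.mem_iff.mp hy))
  have hip : (pqInsert (nw, x.2) t).Perm L' :=
    ((pvInsert_perm _ _).trans ((htE.cons _))).trans hperm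
  exact (PySem.List.sorted_eq_of_perm_of_pairwise_lt L' (pqInsert (nw, x.2) t) (fun p => toLex p) hip hins).symm

-- the sorted queue pops A's argmin and re-inserting yields the updated queue
lemma pvPQ_step (w1 w2 w3 w4 d : Int) :
    ∃ t, PySem.List.sorted (pvPairs [w1, w2, w3, w4]) (fun p => toLex p)
          = ([w1, w2, w3, w4].getD (pvBest w1 w2 w3 w4) 0,
             ((pvBest w1 w2 w3 w4 : Nat) : Int) + 1) :: t ∧
        pqInsert ([w1, w2, w3, w4].getD (pvBest w1 w2 w3 w4) 0 + d,
                  ((pvBest w1 w2 w3 w4 : Nat) : Int) + 1) t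
          = PySem.List.sorted
              (pvPairs ([w1, w2, w3, w4].set (pvBest w1 w2 w3 w4)
                ([w1, w2, w3, w4].getD (pvBest w1 w2 w3 w4) 0 + d)))
              (fun p => toLex p) := by
  obtain ⟨hb4, hmin, hfirst⟩ := pvBest_facts w1 w2 w3 w4
  have hm1 := hmin w1 (by simp)
  have hm2 := hmin w2 (by simp)
  have hm3 := hmin w3 (by simp)
  have hm4 := hmin w4 (by simp)
  interval_cases hb : (pvBest w1 w2 w3 w4)
  · -- best = 0
    simp [List.getD] at hm1 hm2 hm3 hm4
    simp only [pvPairs, List.getD, List.set]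
    norm_num
    refine pvPQ_core _ (w1, 1) (w1 + d) [(w2, 2), (w3, 3), (w4, 4)] _
      (List.Perm.refl _) ?_ ?_ ?_ (List.Perm.refl _)
    · intro y hy hne
      simp only [List.mem_cons, List.not_mem_nil, or_false] at hy
      rcases hy with rfl | rfl | rfl | rfl
      · exact absurd rfl hne
      all_goals { rw [Prod.Lex.toLex_lt_toLex]; simp; omega }
    · simp [Prod.ext_iff]
    · intro y hy
      simp only [List.mem_cons, List.not_mem_nil, or_false] at hy
      rcases hy with rfl | rfl | rfl <;> simp [Prod.ext_iff]
  · -- best = 1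
    have h1 := hfirst 0 (by omega)
    simp [List.getD] at hm1 hm2 hm3 hm4 h1
    simp only [pvPairs, List.getD, List.set]
    norm_num
    refine pvPQ_core _ (w2, 2) (w2 + d) [(w1, 1), (w3, 3), (w4, 4)] _
      (show ((w2, 2) :: [(w1, 1), (w3, 3), (w4, 4)] : List (Int × Int)).Perm
          [(w1, 1), (w2, 2), (w3, 3), (w4, 4)]
        from (List.perm_middle (l₁ := [(w1, 1)]) (l₂ := [(w3, 3), (w4, 4)])).symm)
      ?_ ?_ ?_
      (show ((w2 + d, 2) :: [(w1, 1), (w3, 3), (w4, 4)] : List (Int × Int)).Perm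
          [(w1, 1), (w2 + d, 2), (w3, 3), (w4, 4)]
        from (List.perm_middle (l₁ := [(w1, 1)]) (l₂ := [(w3, 3), (w4, 4)])).symm)
    · intro y hy hne
      simp only [List.mem_cons, List.not_mem_nil, or_false] at hy
      rcases hy with rfl | rfl | rfl | rfl
      · rw [Prod.Lex.toLex_lt_toLex]; simp; omega
      · exact absurd rfl hne
      all_goals { rw [Prod.Lex.toLex_lt_toLex]; simp; omega }
    · simp [Prod.ext_iff]
    · intro y hy
      simp only [List.mem_cons, List.not_mem_nil, or_false] at hy
      rcases hy with rfl | rfl | rfl <;> simp [Prod.ext_iff]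
  · -- best = 2
    have h1 := hfirst 0 (by omega)
    have h2 := hfirst 1 (by omega)
    simp [List.getD] at hm1 hm2 hm3 hm4 h1 h2
    simp only [pvPairs, List.getD, List.set]
    norm_num
    refine pvPQ_core _ (w3, 3) (w3 + d) [(w1, 1), (w2, 2), (w4, 4)] _
      (show ((w3, 3) :: [(w1, 1), (w2, 2), (w4, 4)] : List (Int × Int)).Perm
          [(w1, 1), (w2, 2), (w3, 3), (w4, 4)]
        from (List.perm_middle (l₁ := [(w1, 1), (w2, 2)]) (l₂ := [(w4, 4)])).symm)
      ?_ ?_ ?_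
      (show ((w3 + d, 3) :: [(w1, 1), (w2, 2), (w4, 4)] : List (Int × Int)).Perm
          [(w1, 1), (w2, 2), (w3 + d, 3), (w4, 4)]
        from (List.perm_middle (l₁ := [(w1, 1), (w2, 2)]) (l₂ := [(w4, 4)])).symm)
    · intro y hy hne
      simp only [List.mem_cons, List.not_mem_nil, or_false] at hy
      rcases hy with rfl | rfl | rfl | rfl
      · rw [Prod.Lex.toLex_lt_toLex]; simp; omega
      · rw [Prod.Lex.toLex_lt_toLex]; simp; omega
      · exact absurd rfl hne
      · rw [Prod.Lex.toLex_lt_toLex]; simp; omega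
    · simp [Prod.ext_iff]
    · intro y hy
      simp only [List.mem_cons, List.not_mem_nil, or_false] at hy
      rcases hy with rfl | rfl | rfl <;> simp [Prod.ext_iff]
  · -- best = 3
    have h1 := hfirst 0 (by omega)
    have h2 := hfirst 1 (by omega)
    have h3 := hfirst 2 (by omega)
    simp [List.getD] at hm1 hm2 hm3 hm4 h1 h2 h3
    simp only [pvPairs, List.getD, List.set]
    norm_num
    refine pvPQ_core _ (w4, 4) (w4 + d) [(w1, 1), (w2, 2), (w3, 3)] _
      (show ((w4, 4) :: [(w1, 1), (w2, 2), (w3, 3)] : List (Int × Int)).Perm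
          [(w1, 1), (w2, 2), (w3, 3), (w4, 4)]
        from (List.perm_middle (l₁ := [(w1, 1), (w2, 2), (w3, 3)]) (l₂ := [])).symm)
      ?_ ?_ ?_
      (show ((w4 + d, 4) :: [(w1, 1), (w2, 2), (w3, 3)] : List (Int × Int)).Perm
          [(w1, 1), (w2, 2), (w3, 3), (w4 + d, 4)]
        from (List.perm_middle (l₁ := [(w1, 1), (w2, 2), (w3, 3)]) (l₂ := [])).symm)
    · intro y hy hne
      simp only [List.mem_cons, List.not_mem_nil, or_false] at hy
      rcases hy with rfl | rfl | rfl | rfl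
      · rw [Prod.Lex.toLex_lt_toLex]; simp; omega
      · rw [Prod.Lex.toLex_lt_toLex]; simp; omega
      · rw [Prod.Lex.toLex_lt_toLex]; simp; omega
      · exact absurd rfl hne
    · simp [Prod.ext_iff]
    · intro y hy
      simp only [List.mem_cons, List.not_mem_nil, or_false] at hy
      rcases hy with rfl | rfl | rfl <;> simp [Prod.ext_iff]

lemma pvB_loop (xs : List String) : ∀ (tmp : List String) (j : Nat)
    (w1 w2 w3 w4 : Int) (racc : List (Int × Int × Int)),
    tmp.drop j = xs → j ≤ tmp.length →
    ((PySem.List.pyRange (j : Int) (tmp.length : Int)).foldl (QueBankStepB tmp)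
        (PySem.List.sorted (pvPairs [w1, w2, w3, w4]) (fun p => toLex p), racc)).2
      = racc ++ pvRecs xs (j : Int) [w1, w2, w3, w4] := by
  induction xs with
  | nil =>
    intro tmp j w1 w2 w3 w4 racc hdrop hle
    have hj : j = tmp.length := by
      have := congrArg List.length hdrop; simp at this; omega
    rw [hj, PySem.List.pyRange_one_eq_nil (le_refl _)]
    simp [pvRecs]
  | cons s rest ih =>
    intro tmp j w1 w2 w3 w4 racc hdrop hle
    have hjlt : j < tmp.length := by
      have := congrArg List.length hdrop; simp at this; omega
    have hs : (PySem.List.pyGet? tmp (j : Int)).getD "" = s := by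
      rw [PySem.List.pyGet?_natCast, ← List.head?_drop, hdrop]; rfl
    have hdrop' : tmp.drop (j + 1) = rest := by
      have h1 : List.drop 1 (List.drop j tmp) = List.drop (j + 1) tmp := List.drop_drop
      rw [← h1, hdrop]; rfl
    obtain ⟨t, hS, hins⟩ := pvPQ_step w1 w2 w3 w4 ((PySem.Int.ofStr? s).getD 0 * 5)
    have hb4 := (pvBest_facts w1 w2 w3 w4).1
    rw [PySem.List.pyRange_one_cons (by exact_mod_cast hjlt), List.foldl_cons]
    simp only [QueBankStepB, hs, hS, List.headD_cons, List.tail_cons]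
    rw [hins]
    set b := pvBest w1 w2 w3 w4 with hbdef
    have hrec : pvRecs (s :: rest) (j : Int) [w1, w2, w3, w4]
        = ([w1, w2, w3, w4].getD b 0 + (PySem.Int.ofStr? s).getD 0 * 5, (b : Int) + 1, (j : Int) + 1)
          :: pvRecs rest ((j : Int) + 1)
              ([w1, w2, w3, w4].set b ([w1, w2, w3, w4].getD b 0 + (PySem.Int.ofStr? s).getD 0 * 5)) := by
      simp only [pvRecs, hbdef, pvBest]
    rw [hrec]
    set nw := [w1, w2, w3, w4].getD b 0 + (PySem.Int.ofStr? s).getD 0 * 5 with hnwdef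
    have hset : ∃ v1 v2 v3 v4 : Int, [w1, w2, w3, w4].set b nw = [v1, v2, v3, v4] := by
      interval_cases b
      · exact ⟨nw, w2, w3, w4, rfl⟩
      · exact ⟨w1, nw, w3, w4, rfl⟩
      · exact ⟨w1, w2, nw, w4, rfl⟩
      · exact ⟨w1, w2, w3, nw, rfl⟩
    obtain ⟨v1, v2, v3, v4, hv⟩ := hset
    rw [hv]
    have hih := ih tmp (j + 1) v1 v2 v3 v4 (racc ++ [(nw, (b : Int) + 1, (j : Int) + 1)]) hdrop' (by omega)
    push_cast at hih
    rw [hih, List.append_assoc]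
    rfl

lemma pvA_loop (xs : List String) : ∀ (tmp : List String) (j : Nat)
    (c1 c2 c3 c4 : List Int) (d : PySem.Dict Int (List (Int × Int))) (w1 w2 w3 w4 : Int),
    tmp.drop j = xs → j ≤ tmp.length →
    ((PySem.List.pyRange (j : Int) (tmp.length : Int)).foldl (QueBankStepA tmp)
        (c1, c2, c3, c4, d, w1, w2, w3, w4)).2.2.2.2.1
      = (pvRecs xs (j : Int) [w1, w2, w3, w4]).foldl pvDstep d := by
  induction xs with
  | nil =>
    intro tmp j c1 c2 c3 c4 d w1 w2 w3 w4 hdrop hle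
    have hj : j = tmp.length := by
      have := congrArg List.length hdrop; simp at this; omega
    rw [hj, PySem.List.pyRange_one_eq_nil (le_refl _)]
    simp [pvRecs]
  | cons s rest ih =>
    intro tmp j c1 c2 c3 c4 d w1 w2 w3 w4 hdrop hle
    have hjlt : j < tmp.length := by
      have := congrArg List.length hdrop; simp at this; omega
    have hs : (PySem.List.pyGet? tmp (j : Int)).getD "" = s := by
      rw [PySem.List.pyGet?_natCast, ← List.head?_drop, hdrop]; rfl
    have hdrop' : tmp.drop (j + 1) = rest := by
      have h1 : List.drop 1 (List.drop j tmp) = List.drop (j + 1) tmp := List.drop_drop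
      rw [← h1, hdrop]; rfl
    rw [PySem.List.pyRange_one_cons (by exact_mod_cast hjlt), List.foldl_cons]
    simp only [QueBankStepA, hs, pvRecs]
    have hb4 := (pvBest_facts w1 w2 w3 w4).1
    set b := pvBest w1 w2 w3 w4 with hbdef
    have hbeq : (PySem.List.index? [w1, w2, w3, w4]
        ((PySem.List.min? [w1, w2, w3, w4] (fun x => x)).getD 0)).getD 0 = b := rfl
    have hih := fun c1' c2' c3' c4' d' w1' w2' w3' w4' =>
      ih tmp (j + 1) c1' c2' c3' c4' d' w1' w2' w3' w4' hdrop' (by omega)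
    rw [hbeq]
    interval_cases b <;>
      simp only [reduceIte, Nat.cast_ofNat, Nat.cast_zero, Nat.cast_one] <;>
      push_cast at hih ⊢ <;>
      rw [pvDictUpd] <;>
      simp only [List.set, List.getD, List.getElem?_cons_zero, List.getElem?_cons_succ,
        Option.getD_some, List.foldl_cons, pvDstep] <;>
      exact hih _ _ _ _ _ _ _ _ _

lemma pvRecs_id_lt (xs : List String) : ∀ (i : Int) (waits : List Int),
    ∀ r ∈ pvRecs xs i waits, i < r.2.2 := by
  induction xs with
  | nil => intro i waits r hr; simp [pvRecs] at hr
  | cons s rest ih =>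
    intro i waits r hr
    simp only [pvRecs, List.mem_cons] at hr
    rcases hr with rfl | hr
    · simp
    · have := ih (i + 1) _ r hr; omega

lemma pvRecs_ids (xs : List String) : ∀ (i : Int) (waits : List Int),
    (pvRecs xs i waits).Pairwise (fun a b => a.2.2 < b.2.2) := by
  induction xs with
  | nil => intro i waits; simp [pvRecs]
  | cons s rest ih =>
    intro i waits
    simp only [pvRecs]
    rw [List.pairwise_cons]
    refine ⟨fun b hb => ?_, ih _ _⟩
    have := pvRecs_id_lt rest (i + 1) _ b hb
    simp only []
    omega

-- insertBy only looks at comparisons of the inserted element with list members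
lemma pvInsertBy_congr_mem {α : Type} (p q : α → α → Bool) (x : α) :
    ∀ (L : List α), (∀ y ∈ L, p x y = q x y) →
    PySem.List.insertBy p x L = PySem.List.insertBy q x L := by
  intro L
  induction L with
  | nil => intro _; rfl
  | cons y ys ih =>
    intro h
    show (if p x y then x :: y :: ys else y :: PySem.List.insertBy p x ys)
       = (if q x y then x :: y :: ys else y :: PySem.List.insertBy q x ys)
    rw [h y (by simp), ih (fun z hz => h z (by simp [hz]))]

lemma pvInsertBy_map {α β : Type} (f : α → β) (p : β → β → Bool) (q : α → α → Bool)
    (x : α) (hpq : ∀ a b : α, p (f a) (f b) = q a b) :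
    ∀ (M : List α), PySem.List.insertBy p (f x) (M.map f) = (PySem.List.insertBy q x M).map f := by
  intro M
  induction M with
  | nil => rfl
  | cons y ys ih =>
    show (if p (f x) (f y) then f x :: f y :: ys.map f
          else f y :: PySem.List.insertBy p (f x) (ys.map f))
       = ((if q x y then x :: y :: ys else y :: PySem.List.insertBy q x ys).map f)
    rw [hpq x y]
    cases q x y <;> simp [ih]

-- sorting a mapped list = mapping the sort under the pulled-back key
lemma pvSorted_map {α β κ : Type} [LT κ] [DecidableLT κ] (f : α → β) (key : β → κ) (l : List α) :
    PySem.List.sorted (l.map f) key = (PySem.List.sorted l (fun a => key (f a))).map f := by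
  rw [PySem.List.sorted_eq_foldl_insertBy, PySem.List.sorted_eq_foldl_insertBy]
  suffices h : ∀ acc : List α,
      (l.map f).foldl (fun acc x => PySem.List.insertBy (fun a b => decide (key a < key b)) x acc)
          (acc.map f)
        = (l.foldl (fun acc x =>
            PySem.List.insertBy (fun a b => decide (key (f a) < key (f b))) x acc) acc).map f by
    simpa using h []
  induction l with
  | nil => intro acc; simp
  | cons a l ihl =>
    intro acc
    simp only [List.map_cons, List.foldl_cons]
    rw [pvInsertBy_map f _ _ a (fun a b => rfl), ihl]

-- keys with identical comparison outcomes sort identically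
lemma pvSorted_congr {α κ κ' : Type} [LT κ] [DecidableLT κ] [LT κ'] [DecidableLT κ']
    (k1 : α → κ) (k2 : α → κ') :
    ∀ (l : List α), (∀ a b, a ∈ l → b ∈ l → decide (k1 a < k1 b) = decide (k2 a < k2 b)) →
    PySem.List.sorted l k1 = PySem.List.sorted l k2 := by
  intro l
  induction l using List.reverseRecOn with
  | nil => intro _; rfl
  | append_singleton l x ih =>
    intro h
    rw [PySem.List.sorted_eq_foldl_insertBy, PySem.List.sorted_eq_foldl_insertBy,
        List.foldl_append, List.foldl_append]
    simp only [List.foldl_cons, List.foldl_nil]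
    rw [← PySem.List.sorted_eq_foldl_insertBy, ← PySem.List.sorted_eq_foldl_insertBy,
        ih (fun a b ha hb => h a b (by simp [ha]) (by simp [hb]))]
    refine pvInsertBy_congr_mem _ _ x _ (fun y hy => ?_)
    rw [PySem.List.mem_sorted] at hy
    exact h x y (by simp) (by simp [hy])

-- STABILITY: a stable sort by key equals the sort by (key, arrival order)
lemma pvSorted_stable {α κ τ : Type} [LinearOrder κ] [LinearOrder τ]
    (key : α → κ) (tot : α → τ) :
    ∀ (l : List α), l.Pairwise (fun a b => tot a < tot b) →
    PySem.List.sorted l key = PySem.List.sorted l (fun a => toLex (key a, tot a)) := by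
  intro l
  induction l using List.reverseRecOn with
  | nil => intro _; rfl
  | append_singleton l x ih =>
    intro h
    rw [List.pairwise_append] at h
    obtain ⟨h1, -, h3⟩ := h
    rw [PySem.List.sorted_eq_foldl_insertBy, PySem.List.sorted_eq_foldl_insertBy,
        List.foldl_append, List.foldl_append]
    simp only [List.foldl_cons, List.foldl_nil]
    rw [← PySem.List.sorted_eq_foldl_insertBy, ← PySem.List.sorted_eq_foldl_insertBy, ih h1]
    refine pvInsertBy_congr_mem _ _ x _ (fun y hy => ?_)
    rw [PySem.List.mem_sorted] at hy
    have hxy : tot y < tot x := h3 y hy x (by simp)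
    apply decide_eq_decide.mpr
    rw [Prod.Lex.toLex_lt_toLex]
    constructor
    · exact fun hk => Or.inl hk
    · rintro (hk | ⟨-, ht⟩)
      · exact hk
      · exact absurd ht (lt_asymm hxy)

lemma pvPartition {β : Type} (key : β → Int) :
    ∀ (rs : List β) (K : List Int), K.Nodup → (∀ r ∈ rs, key r ∈ K) →
    (K.flatMap (fun k => rs.filter (fun r => key r == k))).Perm rs := by
  intro rs
  induction rs with
  | nil => intro K _ _; simp
  | cons r rest ih =>
    intro K hnd hcov
    obtain ⟨K1, K2, rfl⟩ := List.append_of_mem (hcov r (by simp))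
    have hnd' := hnd
    rw [List.nodup_append] at hnd'
    obtain ⟨hndK1, hndc, hdisj⟩ := hnd'
    have hK1 : key r ∉ K1 := fun hm => hdisj (key r) hm (key r) (by simp) rfl
    have hK2 : key r ∉ K2 := by
      rw [List.nodup_cons] at hndc; exact hndc.1
    have hstep : ∀ (K' : List Int), key r ∉ K' →
        K'.flatMap (fun k => (r :: rest).filter (fun x => key x == k))
          = K'.flatMap (fun k => rest.filter (fun x => key x == k)) := by
      intro K' hK'
      rw [List.flatMap_def, List.flatMap_def]
      congr 1
      refine List.map_congr_left (fun k hk => ?_)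
      have hne : (key r == k) = false := by
        simp only [beq_eq_false_iff_ne]; rintro rfl; exact hK' hk
      simp [hne]
    have e1 : (K1 ++ key r :: K2).flatMap (fun k => (r :: rest).filter (fun x => key x == k))
        = K1.flatMap (fun k => rest.filter (fun x => key x == k))
            ++ (r :: (rest.filter (fun x => key x == key r)
                ++ K2.flatMap (fun k => rest.filter (fun x => key x == k)))) := by
      rw [List.flatMap_append, List.flatMap_cons, hstep K1 hK1, hstep K2 hK2]
      simp
    have e2 : K1.flatMap (fun k => rest.filter (fun x => key x == k))
          ++ (rest.filter (fun x => key x == key r)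
              ++ K2.flatMap (fun k => rest.filter (fun x => key x == k)))
        = (K1 ++ key r :: K2).flatMap (fun k => rest.filter (fun x => key x == k)) := by
      rw [List.flatMap_append, List.flatMap_cons]
    rw [e1]
    refine List.perm_middle.trans (List.Perm.cons r ?_)
    rw [e2]
    exact ih _ hnd (fun x hx => hcov x (by simp [hx]))

-- the lexicographic sort of the records splits into per-finish groups
lemma pvFlat (rs : List (Int × Int × Int))
    (hids : rs.Pairwise (fun a b => a.2.2 < b.2.2)) :
    PySem.List.sorted rs (fun r => toLex (r.1, toLex (r.2.1, r.2.2)))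
      = (PySem.List.sorted (PySem.Set.ofList (rs.map (fun r => r.1))) (fun k => k)).flatMap
          (fun k => PySem.List.sorted (rs.filter (fun r => r.1 == k))
                      (fun r => toLex (r.2.1, r.2.2))) := by
  apply PySem.List.sorted_eq_of_perm_of_pairwise_lt
  · have h1 : ((PySem.List.sorted (PySem.Set.ofList (rs.map (fun r => r.1))) (fun k => k)).flatMap
          (fun k => PySem.List.sorted (rs.filter (fun r => r.1 == k))
                      (fun r => toLex (r.2.1, r.2.2)))).Perm
        ((PySem.Set.ofList (rs.map (fun r => r.1)) : List Int).flatMap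
          (fun k => rs.filter (fun r => r.1 == k))) :=
      List.Perm.flatMap (PySem.List.sorted_perm _ _ _)
        (fun k _ => PySem.List.sorted_perm _ _ _)
    refine h1.trans ?_
    exact pvPartition (fun r => r.1) rs _ (PySem.Set.nodup_ofList _)
      (fun r hr => (PySem.Set.mem_ofList _ _).mpr (List.mem_map_of_mem hr))
  · rw [List.flatMap_def, List.pairwise_flatten]
    constructor
    · intro g hg
      rw [List.mem_map] at hg
      obtain ⟨k, hk, rfl⟩ := hg
      have hflt : (rs.filter (fun r => r.1 == k)).Pairwise (fun a b => a.2.2 < b.2.2) :=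
        List.Pairwise.sublist List.filter_sublist hids
      have hne : (PySem.List.sorted (rs.filter (fun r => r.1 == k))
          (fun r => toLex (r.2.1, r.2.2))).Pairwise (fun a b => a.2.2 ≠ b.2.2) := by
        refine (List.Perm.pairwise_iff (fun h => h.symm) (PySem.List.sorted_perm _ _ _)).mpr ?_
        exact hflt.imp (fun h => ne_of_lt h)
      have hle := PySem.List.sorted_pairwise (rs.filter (fun r => r.1 == k))
        (fun r => toLex (r.2.1, r.2.2))
      refine List.Pairwise.imp_of_mem ?_ (hle.and hne)
      intro a b ha hb hab
      obtain ⟨hab, hne'⟩ := hab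
      rw [PySem.List.mem_sorted] at ha hb
      have ha1 : a.1 = k := by simpa using (List.of_mem_filter ha)
      have hb1 : b.1 = k := by simpa using (List.of_mem_filter hb)
      rw [Prod.Lex.toLex_lt_toLex]
      right
      refine ⟨by rw [ha1, hb1], ?_⟩
      refine lt_of_le_of_ne hab (fun he => hne' ?_)
      have := toLex_inj.mp he
      rw [Prod.ext_iff] at this
      exact this.2
    · have hK := PySem.List.sorted_ofList_pairwise_lt (rs.map (fun r => r.1))
      rw [List.pairwise_map]
      refine List.Pairwise.imp_of_mem ?_ hK
      intro k k' hk hk' hlt x hx y hy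
      rw [PySem.List.mem_sorted] at hx hy
      have hx1 : x.1 = k := by simpa using (List.of_mem_filter hx)
      have hy1 : y.1 = k' := by simpa using (List.of_mem_filter hy)
      rw [Prod.Lex.toLex_lt_toLex]
      left
      rw [hx1, hy1]
      exact hlt

-- A's dict-of-lists assembly equals B's single lexicographic sort
lemma pvAssemble (rs : List (Int × Int × Int))
    (hids : rs.Pairwise (fun a b => a.2.2 < b.2.2)) :
    ((PySem.List.sorted (rs.foldl pvDstep PySem.Dict.empty).keys (fun k => k)).map
        (fun key => (PySem.List.sorted ((rs.foldl pvDstep PySem.Dict.empty).getD key [])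
                       (fun t => t.2)).map (fun each => each.1))).foldl
        (fun acc each => acc ++ each) []
      = (PySem.List.sorted rs (fun r => toLex (r.1, toLex (r.2.1, r.2.2)))).map
          (fun r => r.2.2) := by
  have hD : pvDstep = fun d r => d.modify r.1 [] (fun l => l ++ [(r.2.2, r.2.1)]) := rfl
  have hfold : rs.foldl pvDstep PySem.Dict.empty
      = (rs.map (fun r => (r.1, (r.2.2, r.2.1)))).foldl
          (fun d p => d.modify p.1 [] (fun l => l ++ [p.2])) PySem.Dict.empty := by
    rw [List.foldl_map, hD]
  have hkeys : (rs.foldl pvDstep PySem.Dict.empty).keys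
      = PySem.Set.ofList (rs.map (fun r => r.1)) := by
    rw [hfold, PySem.Dict.keys_foldl_modify_key]
    rw [List.map_map]
    rfl
  have hgetD : ∀ k, (rs.foldl pvDstep PySem.Dict.empty).getD k []
      = (rs.filter (fun r => r.1 == k)).map (fun r => (r.2.2, r.2.1)) := by
    intro k
    rw [hfold, PySem.Dict.getD_foldl_modify_append]
    rw [List.filter_map, List.map_map]
    simp only [PySem.Dict.getD_empty, List.nil_append]
    rfl
  have hinner : ∀ k,
      (PySem.List.sorted ((rs.foldl pvDstep PySem.Dict.empty).getD k [])
          (fun t => t.2)).map (fun each => each.1)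
        = (PySem.List.sorted (rs.filter (fun r => r.1 == k))
            (fun r => toLex (r.2.1, r.2.2))).map (fun r => r.2.2) := by
    intro k
    rw [hgetD k, pvSorted_map (fun r : Int × Int × Int => (r.2.2, r.2.1)) (fun t : Int × Int => t.2), List.map_map]
    rw [pvSorted_congr (fun r : Int × Int × Int => (r.2.2, r.2.1).2)
        (fun r : Int × Int × Int => r.2.1) _
        (fun a b _ _ => decide_eq_decide.mpr (by simp))]
    rw [pvSorted_stable (fun r : Int × Int × Int => r.2.1) (fun r : Int × Int × Int => r.2.2) _
        (List.Pairwise.sublist List.filter_sublist hids)]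
    rfl
  rw [List.foldl_map, PySem.List.foldl_append_eq_flatMap, List.nil_append, hkeys]
  simp only [hinner]
  rw [pvFlat rs hids, List.map_flatMap]

-- ===== VERDICT (by name: the statement is the Claim_ definition above) =====
theorem QueBank_spec : Claim_equal_QueBank := by
  intro tmp _ _
  show QueBank tmp = QueBank_alt tmp
  have hA := pvA_loop tmp tmp 0 [] [] [] [] PySem.Dict.empty 0 0 0 0 rfl (Nat.zero_le _)
  have hB := pvB_loop tmp tmp 0 0 0 0 0 [] rfl (Nat.zero_le _)
  have hinit : PySem.List.sorted (pvPairs [0, 0, 0, 0]) (fun p => toLex p)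
      = [((0 : Int), (1 : Int)), (0, 2), (0, 3), (0, 4)] := by
    apply PySem.List.sorted_eq_of_perm_of_pairwise_lt
    · exact List.Perm.refl _
    · decide
  rw [hinit] at hB
  simp only [Nat.cast_zero] at hA hB
  simp only [QueBank, QueBank_alt]
  rw [hA, hB]
  simp only [List.nil_append]
  exact pvAssemble (pvRecs tmp 0 [0, 0, 0, 0]) (pvRecs_ids tmp 0 [0, 0, 0, 0])
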